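-- pv_equiv track=rewrite | github.com/XLopchik13/Alg_lab_2 | alg_3.py | compress_coordinates
-- ===== SOURCE A (Python) =====
-- def compress_coordinates(rectangles):
--     set_compress_x = set()
--     set_compress_y = set()
--
--     for r in rectangles:
--         set_compress_x.add(r[0])
--         set_compress_y.add(r[1])
--         set_compress_x.add(r[2])
--         set_compress_y.add(r[3])
--
--     compress_x = sorted(set_compress_x)
--     compress_y = sorted(set_compress_y)
--     return compress_x, compress_y
-- ===== SOURCE B (Python) =====
-- def _dedup_sorted(vals):
--     out = []
--     for v in vals:
--         if not out or out[-1] != v: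
--             out.append(v)
--     return out
--
--
-- def compress_coordinates(rectangles):
--     xs = sorted([x for r in rectangles for x in (r[0], r[2])])
--     ys = sorted([y for r in rectangles for y in (r[1], r[3])])
--     return _dedup_sorted(xs), _dedup_sorted(ys)
-- ===== Notes on version B (the rewrite author's own statement) =====
-- stated objective: alternative
-- what changed: Replaces the two hash sets with flat coordinate lists that are sorted and then deduplicated by a single adjacent-equality scan, so no set is ever built.
import Mathlib
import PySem

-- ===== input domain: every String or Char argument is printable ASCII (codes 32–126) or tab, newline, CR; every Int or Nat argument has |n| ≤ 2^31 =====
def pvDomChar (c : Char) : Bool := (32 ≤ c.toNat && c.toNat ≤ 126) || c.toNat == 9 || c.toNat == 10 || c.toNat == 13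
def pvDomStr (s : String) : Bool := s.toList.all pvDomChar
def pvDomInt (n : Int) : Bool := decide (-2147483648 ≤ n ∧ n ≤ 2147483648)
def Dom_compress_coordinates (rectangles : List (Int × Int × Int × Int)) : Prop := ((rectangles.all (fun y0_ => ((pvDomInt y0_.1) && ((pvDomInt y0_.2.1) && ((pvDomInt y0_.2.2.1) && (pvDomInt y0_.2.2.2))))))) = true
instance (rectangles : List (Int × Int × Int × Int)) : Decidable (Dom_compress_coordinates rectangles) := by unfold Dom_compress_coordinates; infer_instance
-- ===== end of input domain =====

-- B replaces A's two hash sets by flat coordinate lists that are sorted and then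
-- deduplicated with one adjacent-equality scan (alternative decomposition, same cost).


-- ===== PORT A =====
-- for r in rectangles: add r[0], r[2] to set_compress_x and r[1], r[3] to set_compress_y
def compress_coordinates (rectangles : List (Int × Int × Int × Int)) : List Int × List Int :=
  let sets : PySem.Set Int × PySem.Set Int :=
    rectangles.foldl
      (fun p r =>
        let sx := PySem.Set.add p.1 r.1
        let sy := PySem.Set.add p.2 r.2.1
        let sx := PySem.Set.add sx r.2.2.1
        let sy := PySem.Set.add sy r.2.2.2
        (sx, sy))
      (PySem.Set.empty, PySem.Set.empty)
  (PySem.List.sorted sets.1 (fun x => x) false, PySem.List.sorted sets.2 (fun x => x) false)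

-- ===== PORT B =====
-- out = []; for v in vals: if not out or out[-1] != v: out.append(v)
def pvDedupStep (out : List Int) (v : Int) : List Int :=
  match out.getLast? with
  | none => out ++ [v]
  | some p => if p ≠ v then out ++ [v] else out

def pvDedupSorted (vals : List Int) : List Int :=
  vals.foldl pvDedupStep []

def compress_coordinates_alt (rectangles : List (Int × Int × Int × Int)) : List Int × List Int :=
  let xs := PySem.List.sorted (rectangles.flatMap (fun r => [r.1, r.2.2.1])) (fun x => x) false
  let ys := PySem.List.sorted (rectangles.flatMap (fun r => [r.2.1, r.2.2.2])) (fun x => x) false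
  (pvDedupSorted xs, pvDedupSorted ys)

-- ===== PRECONDITION & SPEC =====
def Spec_compress_coordinates (rectangles : List (Int × Int × Int × Int)) (out : List Int × List Int) : Prop := out = compress_coordinates_alt rectangles
instance (rectangles : List (Int × Int × Int × Int)) (out : List Int × List Int) : Decidable (Spec_compress_coordinates rectangles out) := by unfold Spec_compress_coordinates; infer_instance

-- ===== CLAIM (what is proved, stated in full; the proofs are below) =====
def Claim_equal_compress_coordinates : Prop := ∀ (rectangles : List (Int × Int × Int × Int)), Dom_compress_coordinates rectangles → Spec_compress_coordinates rectangles (compress_coordinates rectangles)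

-- ===== LEMMAS AND PROOFS =====

-- in a strictly increasing list every element is ≤ the last one
theorem pv_le_getLast (l : List Int) (h : l.Pairwise (· < ·)) (p : Int)
    (hp : l.getLast? = some p) : ∀ a ∈ l, a = p ∨ a < p := by
  induction l with
  | nil => simp at hp
  | cons x t ih =>
    cases t with
    | nil =>
      simp at hp; subst hp; simp
    | cons y u =>
      simp only [List.getLast?_cons_cons] at hp
      intro a ha
      rcases List.mem_cons.1 ha with rfl | ha'
      · have hxp : a < p := by
          have hmem : p ∈ y :: u := List.mem_of_getLast? (l := y :: u) hp
          exact (List.pairwise_cons.1 h).1 p hmem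
        exact Or.inr hxp
      · exact ih (List.pairwise_cons.1 h).2 hp a ha'

-- invariant of B's dedup loop
theorem pv_dedup_invariant (xs : List Int) (hx : xs.Pairwise (· ≤ ·)) :
    ∀ acc : List Int, acc.Pairwise (· < ·) → (∀ a ∈ acc, ∀ x ∈ xs, a ≤ x) →
      (xs.foldl pvDedupStep acc).Pairwise (· < ·) ∧
      (∀ y, y ∈ xs.foldl pvDedupStep acc ↔ y ∈ acc ∨ y ∈ xs) := by
  induction xs with
  | nil => intro acc hacc _; simpa using hacc
  | cons v t ih =>
    intro acc hacc hle
    have hvt : ∀ x ∈ t, v ≤ x := (List.pairwise_cons.1 hx).1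
    have ht : t.Pairwise (· ≤ ·) := (List.pairwise_cons.1 hx).2
    simp only [List.foldl_cons]
    -- case on the step
    rcases hlast : acc.getLast? with _ | p
    · -- acc is empty
      have haccnil : acc = [] := List.getLast?_eq_none_iff.1 hlast
      subst haccnil
      have h1 : ([] ++ [v] : List Int).Pairwise (· < ·) := by simp
      have h2 : ∀ a ∈ ([] ++ [v] : List Int), ∀ x ∈ t, a ≤ x := by
        simp only [List.nil_append, List.mem_singleton]
        rintro a rfl; exact hvt
      have := ih ht ([] ++ [v]) h1 h2
      refine ⟨?_, ?_⟩
      · simpa [pvDedupStep, hlast] using this.1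
      · intro y
        have := this.2 y
        simp only [pvDedupStep, hlast] at *
        simp only [List.nil_append, List.mem_singleton] at this
        simp [this]
    · by_cases hpv : p = v
      · -- last element already equals v: acc unchanged
        subst hpv
        have hacc' : ∀ a ∈ acc, ∀ x ∈ t, a ≤ x := fun a ha x hx' => hle a ha x (by simp [hx'])
        have := ih ht acc hacc hacc'
        refine ⟨by simpa [pvDedupStep, hlast] using this.1, ?_⟩
        intro y
        have hmemp : p ∈ acc := List.mem_of_getLast? hlast
        have := this.2 y
        simp only [pvDedupStep, hlast, ne_eq, not_true_eq_false, if_false] at *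
        constructor
        · intro hy; rcases this.1 hy with h | h
          · exact Or.inl h
          · exact Or.inr (by simp [h])
        · intro hy; rcases hy with h | h
          · exact this.2 (Or.inl h)
          · rcases List.mem_cons.1 h with rfl | h'
            · exact this.2 (Or.inl hmemp)
            · exact this.2 (Or.inr h')
      · -- append v
        have hplt : p < v := by
          have hp' : p ≤ v := hle p (List.mem_of_getLast? hlast) v (by simp)
          exact lt_of_le_of_ne hp' hpv
        have hall : ∀ a ∈ acc, a < v := by
          intro a ha
          rcases pv_le_getLast acc hacc p hlast a ha with rfl | hlt
          · exact hplt
          · exact hlt.trans hplt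
        have h1 : (acc ++ [v]).Pairwise (· < ·) := by
          rw [List.pairwise_append]
          exact ⟨hacc, by simp, by simpa using hall⟩
        have h2 : ∀ a ∈ acc ++ [v], ∀ x ∈ t, a ≤ x := by
          intro a ha x hx'
          rcases List.mem_append.1 ha with h | h
          · exact hle a h x (by simp [hx'])
          · simp at h; subst h; exact hvt x hx'
        have := ih ht (acc ++ [v]) h1 h2
        refine ⟨by simpa [pvDedupStep, hlast, hpv] using this.1, ?_⟩
        intro y
        have := this.2 y
        simp only [pvDedupStep, hlast, ne_eq, hpv, not_false_eq_true, if_true] at *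
        constructor
        · intro hy; rcases this.1 hy with h | h
          · rcases List.mem_append.1 h with h' | h'
            · exact Or.inl h'
            · simp at h'; subst h'; exact Or.inr (by simp)
          · exact Or.inr (by simp [h])
        · intro hy
          rcases hy with h | h
          · exact this.2 (Or.inl (List.mem_append.2 (Or.inl h)))
          · rcases List.mem_cons.1 h with rfl | h'
            · exact this.2 (Or.inl (by simp))
            · exact this.2 (Or.inr h')

-- the key fact: sorted(set(L)) equals B's sort-then-dedup of L
theorem pv_sorted_set_eq_dedup (L : List Int) :
    PySem.List.sorted (PySem.Set.ofList L) (fun x => x) false =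
      pvDedupSorted (PySem.List.sorted L (fun x => x) false) := by
  have hAlt : (PySem.List.sorted (PySem.Set.ofList L) (fun x => x) false).Pairwise (· < ·) :=
    PySem.List.sorted_ofList_pairwise_lt L
  have hsorted : (PySem.List.sorted L (fun x => x) false).Pairwise (· ≤ ·) := by
    simpa using PySem.List.sorted_pairwise (xs := L) (key := fun x => x)
  have hInv := pv_dedup_invariant (PySem.List.sorted L (fun x => x) false) hsorted
      [] (by simp) (by simp)
  have hB : (pvDedupSorted (PySem.List.sorted L (fun x => x) false)).Pairwise (· < ·) := hInv.1
  have hmemA : ∀ y, y ∈ PySem.List.sorted (PySem.Set.ofList L) (fun x => x) false ↔ y ∈ L := by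
    intro y; rw [PySem.List.mem_sorted]; exact PySem.Set.mem_ofList L y
  have hmemB : ∀ y, y ∈ pvDedupSorted (PySem.List.sorted L (fun x => x) false) ↔ y ∈ L := by
    intro y
    have := hInv.2 y
    simpa [pvDedupSorted, PySem.List.mem_sorted] using this
  have hnodA := hAlt.nodup
  have hnodB := hB.nodup
  have hperm : (PySem.List.sorted (PySem.Set.ofList L) (fun x => x) false).Perm
      (pvDedupSorted (PySem.List.sorted L (fun x => x) false)) := by
    rw [List.perm_ext_iff_of_nodup hnodA hnodB]
    intro y; rw [hmemA, hmemB]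
  exact List.Perm.eq_of_pairwise
    (fun a b _ _ h1 h2 => absurd h2 (not_lt.2 h1.le)) hAlt hB hperm

-- A's pair-of-sets fold splits into two flat-list folds
theorem pv_fold_split (rectangles : List (Int × Int × Int × Int))
    (sx sy : PySem.Set Int) :
    rectangles.foldl
      (fun (p : PySem.Set Int × PySem.Set Int) r =>
        let sx := PySem.Set.add p.1 r.1
        let sy := PySem.Set.add p.2 r.2.1
        let sx := PySem.Set.add sx r.2.2.1
        let sy := PySem.Set.add sy r.2.2.2
        (sx, sy))
      (sx, sy)
    = ((rectangles.flatMap (fun r => [r.1, r.2.2.1])).foldl PySem.Set.add sx,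
       (rectangles.flatMap (fun r => [r.2.1, r.2.2.2])).foldl PySem.Set.add sy) := by
  induction rectangles generalizing sx sy with
  | nil => simp
  | cons r t ih => simp [ih]

-- ===== VERDICT (by name: the statement is the Claim_ definition above) =====
theorem compress_coordinates_spec : Claim_equal_compress_coordinates := by
  intro rectangles _
  unfold Spec_compress_coordinates compress_coordinates compress_coordinates_alt
  have hsplit := pv_fold_split rectangles PySem.Set.empty PySem.Set.empty
  simp only [hsplit]
  have hx := pv_sorted_set_eq_dedup (rectangles.flatMap (fun r => [r.1, r.2.2.1]))
  have hy := pv_sorted_set_eq_dedup (rectangles.flatMap (fun r => [r.2.1, r.2.2.2]))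
  rw [PySem.Set.ofList_eq_foldl] at hx hy
  simp only [PySem.Set.empty] at *
  rw [← hx, ← hy]
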